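-- pv_equiv track=rewrite | github.com/agokulgopi/Python-programs | reverse_and_ sum.py | reverse_and_sum
-- ===== SOURCE A (Python) =====
-- def reverse_and_sum(num):
--     reversed_num = 0
--     sum_of_digits = 0
--
--     while num > 0:
--         digit = num % 10
--         reversed_num = reversed_num * 10 + digit
--         sum_of_digits += digit
--         num //= 10
--     return reversed_num,sum_of_digits
-- ===== SOURCE B (Python) =====
-- def _go(n):
--     # returns (reversed value of n's digits, digit sum, 10**digit_count(n))
--     if n <= 0:
--         return 0, 0, 1
--     rev, s, p = _go(n // 10)
--     d = n % 10
--     return d * p + rev, s + d, 10 * p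
--
--
-- def reverse_and_sum(num):
--     rev, s, _ = _go(num)
--     return rev, s
-- ===== Notes on version B (the rewrite author's own statement) =====
-- stated objective: alternative
-- what changed: Replaces A's while loop with two mutable accumulators by a recursion over the digits that returns (reversed value, digit sum, place value = base to the digit count) and combines each digit by place-value arithmetic d*p + rev instead of rev*base + d accumulation.
import Mathlib
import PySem

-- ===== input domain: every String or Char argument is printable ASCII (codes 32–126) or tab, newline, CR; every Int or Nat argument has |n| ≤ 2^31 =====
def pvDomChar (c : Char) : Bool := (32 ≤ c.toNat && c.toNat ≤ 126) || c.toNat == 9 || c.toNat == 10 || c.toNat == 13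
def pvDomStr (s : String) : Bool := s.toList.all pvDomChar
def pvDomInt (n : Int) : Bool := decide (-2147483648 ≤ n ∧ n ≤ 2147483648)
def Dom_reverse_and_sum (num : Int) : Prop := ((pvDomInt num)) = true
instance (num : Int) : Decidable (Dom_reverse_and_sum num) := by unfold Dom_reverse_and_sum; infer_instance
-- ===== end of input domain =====

-- B replaces A's accumulator while-loop by a digit recursion returning (reversed, sum, place value); objective: alternative, same cost.


-- ===== PORT A =====
-- A's while loop: two accumulators updated with num % 10 and num //= 10.
def pvLoopA (num rev s : Int) : Int × Int :=
  if num > 0 then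
    pvLoopA (PySem.Int.floordiv num 10) (rev * 10 + PySem.Int.mod num 10)
      (s + PySem.Int.mod num 10)
  else (rev, s)
termination_by num.toNat
decreasing_by
  rename_i h
  rw [PySem.Int.floordiv_eq_ediv_of_pos (by omega)]
  omega

def reverse_and_sum (num : Int) : Int × Int := pvLoopA num 0 0

-- ===== PORT B =====
-- B's recursion: returns (reversed value, digit sum, 10 ^ digit count).
def pvGoB (n : Int) : Int × Int × Int :=
  if n > 0 then
    let r := pvGoB (PySem.Int.floordiv n 10)
    let d := PySem.Int.mod n 10
    (d * r.2.2 + r.1, r.2.1 + d, 10 * r.2.2)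
  else (0, 0, 1)
termination_by n.toNat
decreasing_by
  rename_i h
  rw [PySem.Int.floordiv_eq_ediv_of_pos (by omega)]
  omega

def reverse_and_sum_alt (num : Int) : Int × Int :=
  ((pvGoB num).1, (pvGoB num).2.1)

-- ===== PRECONDITION & SPEC =====
def Spec_reverse_and_sum (num : Int) (out : Int × Int) : Prop := out = reverse_and_sum_alt num
instance (num : Int) (out : Int × Int) : Decidable (Spec_reverse_and_sum num out) := by unfold Spec_reverse_and_sum; infer_instance

-- ===== CLAIM (what is proved, stated in full; the proofs are below) =====
def Claim_equal_reverse_and_sum : Prop := ∀ (num : Int), Dom_reverse_and_sum num → Spec_reverse_and_sum num (reverse_and_sum num)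

-- ===== LEMMAS AND PROOFS =====

-- Loop invariant: A's accumulator loop equals B's place-value recursion,
-- with the accumulators folded in via rev * 10^k and s + digitSum.
theorem pvLoopA_eq_goB (num rev s : Int) :
    pvLoopA num rev s = (rev * (pvGoB num).2.2 + (pvGoB num).1, s + (pvGoB num).2.1) := by
  fun_induction pvLoopA num rev s with
  | case1 n rev s h ih =>
    rw [pvGoB, if_pos h]
    simp only at ih ⊢
    rw [ih, Prod.mk.injEq]
    constructor <;> ring
  | case2 n rev s h =>
    rw [pvGoB, if_neg h]
    simp

-- ===== VERDICT (by name: the statement is the Claim_ definition above) =====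
theorem reverse_and_sum_spec : Claim_equal_reverse_and_sum := by
  intro num _
  unfold Spec_reverse_and_sum reverse_and_sum reverse_and_sum_alt
  rw [pvLoopA_eq_goB]
  simp
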